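-- pv_equiv track=rewrite | github.com/hiepnh137/VTCC-NLP-at-SemEval-2023-Task-6 | create_entity_graph.py | dup_ngram_with_window
-- ===== SOURCE A (Python) =====
-- import string
--
-- punctuation = list(string.punctuation)
--
-- def dup_ngram_with_window(ngrams1, ngrams2):
--     for n1 in ngrams1:
--         # if not is_entity(n1):
--         #     continue
--         flag = False
--         for s in n1:
--             if s in punctuation:
--                 flag = True
--                 break
--         if flag:
--             continue
--         for n2 in ngrams2:
--             if n1 == n2:
--                 return True
--     return False
-- ===== SOURCE B (Python) =====
-- import string
--
-- punctuation = list(string.punctuation)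
--
-- def dup_ngram_with_window(ngrams1, ngrams2):
--     common = set(ngrams1) & set(ngrams2)
--     for n in common:
--         if not any(s in punctuation for s in n):
--             return True
--     return False
-- ===== Notes on version B (the rewrite author's own statement) =====
-- stated objective: alternative
-- what changed: B first builds the set intersection of the two ngram lists and then scans only the shared ngrams for one free of punctuation, replacing A's per-n1 punctuation filter followed by a nested linear scan of ngrams2.
import Mathlib
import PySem

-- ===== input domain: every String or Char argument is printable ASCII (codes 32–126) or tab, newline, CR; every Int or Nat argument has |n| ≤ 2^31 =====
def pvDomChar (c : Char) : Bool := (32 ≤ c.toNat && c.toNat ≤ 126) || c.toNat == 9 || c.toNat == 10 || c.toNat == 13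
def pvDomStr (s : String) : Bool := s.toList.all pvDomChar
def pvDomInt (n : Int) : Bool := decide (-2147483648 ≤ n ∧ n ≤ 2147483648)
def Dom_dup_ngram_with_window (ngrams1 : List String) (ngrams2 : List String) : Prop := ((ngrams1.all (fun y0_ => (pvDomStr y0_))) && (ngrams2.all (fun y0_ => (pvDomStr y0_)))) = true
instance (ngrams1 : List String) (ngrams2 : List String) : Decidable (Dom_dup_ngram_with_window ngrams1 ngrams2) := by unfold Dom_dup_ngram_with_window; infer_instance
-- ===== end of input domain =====

-- B replaces A's filter-then-nested-scan with a set intersection followed by a scan of the shared ngrams (alternative structure; punctuation test unchanged).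

-- string.punctuation, as a list of characters (Python iterates a string by 1-char strings)
def pvPunct : List Char := "!\"#$%&'()*+,-./:;<=>?@[\\]^_`{|}~".toList

-- ===== PORT A =====
-- outer 'for n1 in ngrams1' loop of A; inner loops are the short-circuit folds they denote
def dupALoop (ngrams2 : List String) : List String → Bool
  | [] => false
  | n1 :: rest =>
    let flag := n1.toList.any (fun s => pvPunct.contains s)   -- 'for s in n1: if s in punctuation: flag=True; break'
    if flag then dupALoop ngrams2 rest
    else if ngrams2.any (fun n2 => n1 == n2) then true        -- 'for n2 in ngrams2: if n1 == n2: return True'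
    else dupALoop ngrams2 rest

def dup_ngram_with_window (ngrams1 : List String) (ngrams2 : List String) : Bool :=
  dupALoop ngrams2 ngrams1

-- ===== PORT B =====
def dup_ngram_with_window_alt (ngrams1 : List String) (ngrams2 : List String) : Bool :=
  let common : PySem.Set String := PySem.Set.inter (PySem.Set.ofList ngrams1) (PySem.Set.ofList ngrams2)
  -- 'for n in common: if not any(...): return True' — a Bool any over the set (order-independent)
  common.any (fun n => !(n.toList.any (fun s => pvPunct.contains s)))

-- ===== PRECONDITION & SPEC =====
def Spec_dup_ngram_with_window (ngrams1 : List String) (ngrams2 : List String) (out : Bool) : Prop := out = dup_ngram_with_window_alt ngrams1 ngrams2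
instance (ngrams1 : List String) (ngrams2 : List String) (out : Bool) : Decidable (Spec_dup_ngram_with_window ngrams1 ngrams2 out) := by unfold Spec_dup_ngram_with_window; infer_instance

-- ===== CLAIM (what is proved, stated in full; the proofs are below) =====
def Claim_equal_dup_ngram_with_window : Prop := ∀ (ngrams1 : List String) (ngrams2 : List String), Dom_dup_ngram_with_window ngrams1 ngrams2 → Spec_dup_ngram_with_window ngrams1 ngrams2 (dup_ngram_with_window ngrams1 ngrams2)

-- ===== LEMMAS AND PROOFS =====

def pvGood (n : String) : Bool := !(n.toList.any (fun s => pvPunct.contains s))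

theorem dupALoop_true (ngrams2 : List String) (l : List String) :
    dupALoop ngrams2 l = true ↔ ∃ n ∈ l, pvGood n = true ∧ n ∈ ngrams2 := by
  induction l with
  | nil => simp [dupALoop]
  | cons n1 rest ih =>
    show (if (n1.toList.any (fun s => pvPunct.contains s)) = true then dupALoop ngrams2 rest
      else if (ngrams2.any (fun n2 => n1 == n2)) = true then true else dupALoop ngrams2 rest) = true ↔ _
    by_cases h : (n1.toList.any (fun s => pvPunct.contains s)) = true
    · rw [if_pos h, ih]
      constructor
      · rintro ⟨n, hn, hg, hm⟩; exact ⟨n, List.mem_cons_of_mem _ hn, hg, hm⟩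
      · rintro ⟨n, hn, hg, hm⟩
        rcases List.mem_cons.mp hn with rfl | hn'
        · unfold pvGood at hg
          rw [Bool.not_eq_true'] at hg
          rw [hg] at h; exact absurd h (by simp)
        · exact ⟨n, hn', hg, hm⟩
    · rw [if_neg h]
      by_cases h2 : (ngrams2.any (fun n2 => n1 == n2)) = true
      · rw [if_pos h2]
        constructor
        · intro _
          refine ⟨n1, List.mem_cons_self, ?_, ?_⟩
          · unfold pvGood
            rw [Bool.not_eq_true']
            exact eq_false_of_ne_true h
          · obtain ⟨y, hy, hxy⟩ := List.any_eq_true.mp h2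
            exact (eq_of_beq hxy) ▸ hy
        · intro _; rfl
      · rw [if_neg h2, ih]
        constructor
        · rintro ⟨n, hn, hg, hm⟩; exact ⟨n, List.mem_cons_of_mem _ hn, hg, hm⟩
        · rintro ⟨n, hn, hg, hm⟩
          rcases List.mem_cons.mp hn with rfl | hn'
          · exact absurd (List.any_eq_true.mpr ⟨n, hm, by simp⟩) h2
          · exact ⟨n, hn', hg, hm⟩

theorem alt_true (ngrams1 ngrams2 : List String) :
    dup_ngram_with_window_alt ngrams1 ngrams2 = true ↔
      ∃ n ∈ ngrams1, pvGood n = true ∧ n ∈ ngrams2 := by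
  show List.any _ _ = true ↔ _
  rw [List.any_eq_true]
  constructor
  · rintro ⟨n, hn, hg⟩
    have hm := (PySem.Set.mem_inter _ _ _).mp hn
    exact ⟨n, (PySem.Set.mem_ofList _ _).mp hm.1, hg, (PySem.Set.mem_ofList _ _).mp hm.2⟩
  · rintro ⟨n, h1, hg, h2⟩
    exact ⟨n, (PySem.Set.mem_inter _ _ _).mpr ⟨(PySem.Set.mem_ofList _ _).mpr h1,
      (PySem.Set.mem_ofList _ _).mpr h2⟩, hg⟩

-- ===== VERDICT (by name: the statement is the Claim_ definition above) =====
theorem dup_ngram_with_window_spec : Claim_equal_dup_ngram_with_window := by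
  intro ngrams1 ngrams2 _
  unfold Spec_dup_ngram_with_window dup_ngram_with_window
  rw [Bool.eq_iff_iff, dupALoop_true, alt_true]
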